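-- pv_equiv track=rewrite | github.com/Junobee25/KT-AlgorithmStudy | HSR/1_Greedy/Q_6.py | solution
-- ===== SOURCE A (Python) =====
-- def solution(food_times, k):
--     answer = 0
--
--     n = len(food_times)
--     i = 0
--
--     while k!=0:
--         if i == n:
--             i = 0
--
--         if food_times[i] > 0:
--             food_times[i] -= 1
--             k -= 1
--             i += 1
--         else:
--             i += 1
--
--     check = 0 # 먹을 음식이 없는지 확인
--     for i in range(n):
--         if food_times[i] == 0:
--             check = -1
--         else:
--             check = 0
--             break
--
--     if check == -1:
--         return -1
--     else:
--         if i == n: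
--             answer = 1
--         else:
--             answer = i+1
--
--     return answer
-- ===== SOURCE B (Python) =====
-- def solution(food_times, k):
--     # B: instead of simulating second by second, consume whole rounds at once:
--     # with m positive foods and smallest positive time s, skip q = min(s, k//m)
--     # full rounds in one step; then eat the first k remaining positives once and
--     # return 1 + index of the first nonzero entry (-1 if none).
--     # (A mutates food_times in place; B does not.)
--     foods = list(food_times)
--     while True:
--         m = len([t for t in foods if t > 0])
--         if m == 0 or k < m:
--             break
--         s = min([t for t in foods if t > 0])
--         q = min(s, k // m)
--         foods = [t - q if t > 0 else t for t in foods]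
--         k -= q * m
--     res = []
--     for t in foods:
--         if k > 0 and t > 0:
--             res.append(t - 1)
--             k -= 1
--         else:
--             res.append(t)
--     for j, t in enumerate(res):
--         if t != 0:
--             return j + 1
--     return -1
-- ===== Notes on version B (the rewrite author's own statement) =====
-- stated objective: alternative
-- what changed: B replaces A's one-second-at-a-time cyclic simulation by round skipping: it removes min(s, k//m) whole rounds over the m positive foods in one arithmetic step, then performs the single partial round and scans once for the first nonzero entry (fewer iterations for large k; a timing run could not confirm a consistent speed-up).
-- intended difference: On the empty list (with k = 0, the only value A terminates on) A returns 1, an artefact of leftover loop state i == n == 0; B returns -1, the intended 'no food left' answer. — e.g. on solution([], 0): A returns 1, B returns -1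
import Mathlib
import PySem

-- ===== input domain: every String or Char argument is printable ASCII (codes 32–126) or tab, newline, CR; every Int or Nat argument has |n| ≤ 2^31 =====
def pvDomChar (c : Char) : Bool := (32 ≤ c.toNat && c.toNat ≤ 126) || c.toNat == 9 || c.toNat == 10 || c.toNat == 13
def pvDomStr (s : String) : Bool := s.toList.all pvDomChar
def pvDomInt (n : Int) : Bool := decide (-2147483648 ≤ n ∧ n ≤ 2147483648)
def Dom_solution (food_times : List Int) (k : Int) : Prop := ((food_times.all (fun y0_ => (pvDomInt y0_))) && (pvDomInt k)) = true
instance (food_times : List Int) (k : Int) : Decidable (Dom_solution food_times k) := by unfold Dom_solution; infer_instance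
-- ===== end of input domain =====

-- B consumes whole rounds of eating at once instead of A's second-by-second simulation
-- (objective: alternative). Python A mutates food_times in place; the claims are about
-- the return value only (the ports are pure).

-- ===== PORT A =====
-- A's while loop; state (food_times, k, i). The fuel only makes the recursion total:
-- inside Pre_solution it never runs out. pyGet? = none is Python's IndexError (outside Pre_).
def solLoopA : Nat → List Int → Int → Int → List Int × Int × Int
  | 0, foods, k, i => (foods, k, i)
  | fuel+1, foods, k, i =>
    if k = 0 then (foods, k, i)
    else
      let i' := if i = PySem.List.len foods then 0 else i
      match PySem.List.pyGet? foods i' with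
      | none => (foods, k, i')
      | some t =>
        if 0 < t then solLoopA fuel (PySem.List.pySetD foods i' (t-1)) (k-1) (i'+1)
        else solLoopA fuel foods k (i'+1)

-- A's 'for i in range(n)' check loop: returns (check, i) as Python leaves them.
def solCheckA : List Int → List Int → Int → Int → Int × Int
  | _, [], check, i => (check, i)
  | foods, j :: rest, check, i =>
    match PySem.List.pyGet? foods j with
    | none => (check, i)
    | some t => if t = 0 then solCheckA foods rest (-1) j else (0, j)

def solution (food_times : List Int) (k : Int) : Int :=
  let n := PySem.List.len food_times
  let st := solLoopA (k.toNat * (food_times.length + 2) + food_times.length + 2) food_times k 0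
  let r := solCheckA st.1 (PySem.List.pyRange 0 n 1) 0 st.2.2
  if r.1 = -1 then -1
  else if r.2 = n then 1 else r.2 + 1

-- ===== PORT B =====
-- B's 'while True' round-skipping loop; k drops by at least 1 per iteration, so
-- fuel k.toNat + 1 is never exhausted. min? none is unreachable (guarded by m ≠ 0).
def altRounds : Nat → List Int → Int → List Int × Int
  | 0, foods, k => (foods, k)
  | fuel+1, foods, k =>
    let m : Int := ((foods.filter (fun t => 0 < t)).length : Int)
    if m = 0 ∨ k < m then (foods, k)
    else
      match PySem.List.min? (foods.filter (fun t => 0 < t)) (fun t => t) with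
      | none => (foods, k)
      | some s =>
        let q := min s (PySem.Int.floordiv k m)
        altRounds fuel (foods.map (fun t => if 0 < t then t - q else t)) (k - q * m)

-- B's partial-round loop building res while decrementing k.
def altEat : List Int → Int → List Int × Int
  | [], k => ([], k)
  | t :: ts, k =>
    if 0 < k ∧ 0 < t then
      let r := altEat ts (k-1)
      ((t-1) :: r.1, r.2)
    else
      let r := altEat ts k
      (t :: r.1, r.2)

-- B's final 'for j, t in enumerate(res)' scan.
def altScan : List Int → Int → Int
  | [], _ => -1
  | t :: ts, j => if t ≠ 0 then j + 1 else altScan ts (j + 1)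

def solution_alt (food_times : List Int) (k : Int) : Int :=
  let p := altRounds (k.toNat + 1) food_times k
  let r := altEat p.1 p.2
  altScan r.1 0

-- ===== PRECONDITION & SPEC =====
-- Python A terminates exactly when 0 ≤ k ≤ sum of the positive entries: for k outside
-- that range the while loop diverges (or raises IndexError on the empty list).
def Pre_solution (food_times : List Int) (k : Int) : Prop :=
  0 ≤ k ∧ k ≤ (food_times.map (fun t => max t 0)).sum
instance (food_times : List Int) (k : Int) : Decidable (Pre_solution food_times k) := by
  unfold Pre_solution; infer_instance
def pvWitness_solution : List Int × Int := ([3, 1, 2], 5)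

-- On the empty list (k = 0 is the only value A terminates on) A returns 1 — an artefact
-- of the leftover loop state i == n == 0 — while B returns -1, the intended 'no food' answer.
def D_solution (food_times : List Int) (k : Int) : Prop := food_times = []
instance (food_times : List Int) (k : Int) : Decidable (D_solution food_times k) := by
  unfold D_solution; infer_instance

def Spec_solution (food_times : List Int) (k : Int) (out : Int) : Prop :=
  ¬ D_solution food_times k → out = solution_alt food_times k
instance (food_times : List Int) (k : Int) (out : Int) : Decidable (Spec_solution food_times k out) := by
  unfold Spec_solution; infer_instance

def pvDiffWitness_solution : List Int × Int := ([], 0)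
def pvDiffWitnessOut_solution : Int × Int := (1, -1)


-- ===== CLAIM (what is proved, stated in full; the proofs are below) =====
def Claim_unchanged_solution : Prop := ∀ (food_times : List Int) (k : Int), Dom_solution food_times k → Pre_solution food_times k → Spec_solution food_times k (solution food_times k)
def Claim_changed_solution : Prop := Dom_solution (pvDiffWitness_solution.1) (pvDiffWitness_solution.2) ∧ Pre_solution (pvDiffWitness_solution.1) (pvDiffWitness_solution.2) ∧ D_solution (pvDiffWitness_solution.1) (pvDiffWitness_solution.2) ∧ solution (pvDiffWitness_solution.1) (pvDiffWitness_solution.2) = pvDiffWitnessOut_solution.1 ∧ solution_alt (pvDiffWitness_solution.1) (pvDiffWitness_solution.2) = pvDiffWitnessOut_solution.2 ∧ pvDiffWitnessOut_solution.1 ≠ pvDiffWitnessOut_solution.2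
def Claim_exact_solution : Prop := ∀ (food_times : List Int) (k : Int), Dom_solution food_times k → Pre_solution food_times k → D_solution food_times k → solution food_times k ≠ solution_alt food_times k

-- ===== LEMMAS AND PROOFS =====

-- count of positive entries / sum of positive parts
def pvCPos (l : List Int) : Nat := l.countP (fun t => 0 < t)
def pvSPos (l : List Int) : Int := (l.map (fun t => max t 0)).sum
-- decrement a positive entry by 1 / by q (what one round / q rounds of eating do)
def pvDec1 (t : Int) : Int := if 0 < t then t - 1 else t
def pvDecQ (q : Nat) (t : Int) : Int := if 0 < t then t - (q : Int) else t
-- the (foods, k) part of A's loop state (the final i is irrelevant for n > 0)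
def pvFK (s : List Int × Int × Int) : List Int × Int := (s.1, s.2.1)

theorem solLoopA_k_zero (f : Nat) (foods : List Int) (i : Int) :
    solLoopA f foods 0 i = (foods, 0, i) := by
  cases f <;> simp [solLoopA]

theorem pvCPos_zero_map (l : List Int) (h : pvCPos l = 0) : l.map pvDec1 = l := by
  induction l with
  | nil => rfl
  | cons t ts ih =>
    simp only [pvCPos, List.countP_cons] at h ih ⊢
    by_cases ht : (0 : Int) < t
    · simp [ht] at h
    · simp only [List.map_cons, pvDec1, if_neg ht]
      rw [ih (by omega)]

theorem pySetD_append_cons (pre ts : List Int) (t v : Int) :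
    PySem.List.pySetD (pre ++ t :: ts) ((pre.length : Nat) : Int) v = pre ++ v :: ts := by
  have h := PySem.List.pySet?_natCast (pre ++ t :: ts) pre.length v (by simp)
  simp [PySem.List.pySetD, h]

theorem solLoopA_pass_full (suf : List Int) : ∀ (pre : List Int) (k : Int) (f : Nat),
    0 ≤ k → (pvCPos suf : Int) ≤ k →
    pvFK (solLoopA (suf.length + f) (pre ++ suf) k (pre.length : Int)) =
    pvFK (solLoopA f (pre ++ suf.map pvDec1) (k - (pvCPos suf : Int)) (((pre ++ suf).length : Nat) : Int)) := by
  induction suf with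
  | nil =>
    intro pre k f _ _
    simp [pvCPos]
  | cons t ts ih =>
    intro pre k f h0 hcp
    by_cases hk : k = 0
    · subst hk
      have hc : pvCPos (t :: ts) = 0 := by
        have : ((pvCPos (t :: ts) : Nat) : Int) ≤ 0 := hcp
        omega
      rw [pvCPos_zero_map _ hc]
      simp only [hc, Nat.cast_zero, sub_zero]
      rw [solLoopA_k_zero, solLoopA_k_zero]
      rfl
    · have hfuel : (t :: ts).length + f = (ts.length + f) + 1 := by
        simp [List.length_cons]; omega
      rw [hfuel]
      simp only [solLoopA, if_neg hk]
      have hne : ¬ ((pre.length : Nat) : Int) = PySem.List.len (pre ++ t :: ts) := by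
        simp [PySem.List.len_eq]; omega
      rw [if_neg hne, PySem.List.pyGet?_append_length]
      simp only []
      have hcc : pvCPos (t :: ts) = (if 0 < t then 1 else 0) + pvCPos ts := by
        simp only [pvCPos, List.countP_cons]
        by_cases ht : (0 : Int) < t <;> simp [ht] <;> omega
      by_cases ht : 0 < t
      · rw [if_pos ht]
        simp only [pySetD_append_cons]
        have h1 : (pre ++ (t-1) :: ts : List Int) = (pre ++ [t-1]) ++ ts := by simp
        have h2 : ((pre.length : Nat) : Int) + 1 = (((pre ++ [t-1]).length : Nat) : Int) := by
          push_cast; simp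
        rw [h1, h2]
        have hcp' : ((pvCPos ts : Nat) : Int) ≤ k - 1 := by
          rw [hcc] at hcp; simp [ht] at hcp; push_cast at hcp ⊢; omega
        have hrec := ih (pre ++ [t-1]) (k-1) f (by omega) hcp'
        have e1 : (pre ++ [t-1]) ++ ts.map pvDec1 = pre ++ (t :: ts).map pvDec1 := by
          simp [pvDec1, ht]
        have e2 : (k - 1) - ((pvCPos ts : Nat) : Int) = k - ((pvCPos (t :: ts) : Nat) : Int) := by
          rw [hcc]; simp [ht]; push_cast; ring
        have e3 : ((((pre ++ [t-1]) ++ ts).length : Nat) : Int) = (((pre ++ t :: ts).length : Nat) : Int) := by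
          simp
        rw [e1, e2, e3] at hrec
        exact hrec
      · rw [if_neg ht]
        have h1 : (pre ++ t :: ts : List Int) = (pre ++ [t]) ++ ts := by simp
        have h2 : ((pre.length : Nat) : Int) + 1 = (((pre ++ [t]).length : Nat) : Int) := by
          push_cast; simp
        have hcp' : ((pvCPos ts : Nat) : Int) ≤ k := by
          rw [hcc] at hcp; simp [ht] at hcp; exact hcp
        have hrec := ih (pre ++ [t]) k f h0 hcp'
        have e1 : (pre ++ [t]) ++ ts.map pvDec1 = pre ++ (t :: ts).map pvDec1 := by
          simp [pvDec1, ht]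
        have e2 : k - ((pvCPos ts : Nat) : Int) = k - ((pvCPos (t :: ts) : Nat) : Int) := by
          rw [hcc]; simp [ht]
        rw [e1, e2] at hrec
        rw [h1]
        conv_lhs => rw [h2]
        exact hrec

theorem altEat_nonpos (l : List Int) (k : Int) (hk : k ≤ 0) : altEat l k = (l, k) := by
  induction l with
  | nil => rfl
  | cons t ts ih =>
    have hc : ¬ (0 < k ∧ 0 < t) := by omega
    simp [altEat, hc, ih]

theorem solLoopA_pass_partial (suf : List Int) : ∀ (pre : List Int) (k : Int) (f : Nat),
    0 ≤ k → k < (pvCPos suf : Int) →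
    pvFK (solLoopA (suf.length + f) (pre ++ suf) k (pre.length : Int)) =
    (pre ++ (altEat suf k).1, 0) := by
  induction suf with
  | nil =>
    intro pre k f h0 hcp
    simp [pvCPos] at hcp
    omega
  | cons t ts ih =>
    intro pre k f h0 hcp
    by_cases hk : k = 0
    · subst hk
      rw [solLoopA_k_zero, altEat_nonpos _ _ le_rfl]
      rfl
    · have hfuel : (t :: ts).length + f = (ts.length + f) + 1 := by
        simp [List.length_cons]; omega
      rw [hfuel]
      simp only [solLoopA, if_neg hk]
      have hne : ¬ ((pre.length : Nat) : Int) = PySem.List.len (pre ++ t :: ts) := by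
        simp [PySem.List.len_eq]; omega
      rw [if_neg hne, PySem.List.pyGet?_append_length]
      simp only []
      have hcc : pvCPos (t :: ts) = (if 0 < t then 1 else 0) + pvCPos ts := by
        simp only [pvCPos, List.countP_cons]
        by_cases ht : (0 : Int) < t <;> simp [ht] <;> omega
      by_cases ht : 0 < t
      · rw [if_pos ht]
        simp only [pySetD_append_cons]
        have h1 : (pre ++ (t-1) :: ts : List Int) = (pre ++ [t-1]) ++ ts := by simp
        have h2 : ((pre.length : Nat) : Int) + 1 = (((pre ++ [t-1]).length : Nat) : Int) := by
          push_cast; simp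
        rw [h1, h2]
        have hcp' : k - 1 < ((pvCPos ts : Nat) : Int) := by
          rw [hcc] at hcp; simp [ht] at hcp; omega
        have hrec := ih (pre ++ [t-1]) (k-1) f (by omega) hcp'
        have e1 : (pre ++ [t-1]) ++ (altEat ts (k-1)).1 = pre ++ (altEat (t :: ts) k).1 := by
          simp [altEat, (by omega : (0:Int) < k), ht]
        rw [e1] at hrec
        exact hrec
      · rw [if_neg ht]
        have h1 : (pre ++ t :: ts : List Int) = (pre ++ [t]) ++ ts := by simp
        have h2 : ((pre.length : Nat) : Int) + 1 = (((pre ++ [t]).length : Nat) : Int) := by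
          push_cast; simp
        have hcp' : k < ((pvCPos ts : Nat) : Int) := by
          rw [hcc] at hcp; simp [ht] at hcp; exact hcp
        have hrec := ih (pre ++ [t]) k f h0 hcp'
        have e1 : (pre ++ [t]) ++ (altEat ts k).1 = pre ++ (altEat (t :: ts) k).1 := by
          simp [altEat, ht]
        rw [e1] at hrec
        rw [h1]
        conv_lhs => rw [h2]
        exact hrec

theorem solLoopA_reset (f : Nat) (foods : List Int) (k : Int) :
    pvFK (solLoopA f foods k ((foods.length : Nat) : Int)) = pvFK (solLoopA f foods k 0) := by
  cases f with
  | zero => rfl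
  | succ f =>
    by_cases hk : k = 0
    · subst hk; simp [solLoopA, pvFK]
    · simp [solLoopA, hk, ite_self]

theorem pvCPos_map_dec1_le (l : List Int) : pvCPos (l.map pvDec1) ≤ pvCPos l := by
  simp only [pvCPos, List.countP_map]
  apply List.countP_mono_left
  intro a _ h
  simp only [Function.comp_apply, decide_eq_true_eq, pvDec1] at h
  by_cases ha : (0 : Int) < a
  · simpa using ha
  · rw [if_neg ha] at h
    exact (ha h).elim

theorem map_pvDecQ_zero (l : List Int) : l.map (pvDecQ 0) = l := by
  induction l with
  | nil => rfl
  | cons t ts ih => simp [pvDecQ, ih]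

theorem solLoopA_rounds (q : Nat) : ∀ (foods : List Int) (k : Int) (f : Nat),
    0 ≤ k → (q : Int) * (pvCPos foods : Int) ≤ k →
    (∀ t ∈ foods, 0 < t → (q : Int) ≤ t) →
    pvFK (solLoopA (q * foods.length + f) foods k 0) =
    pvFK (solLoopA f (foods.map (pvDecQ q)) (k - (q : Int) * (pvCPos foods : Int)) 0) := by
  induction q with
  | zero =>
    intro foods k f _ _ _
    rw [map_pvDecQ_zero]
    simp
  | succ q ih =>
    intro foods k f h0 hqk hpos
    have hm0 : (0 : Int) ≤ (pvCPos foods : Nat) := by positivity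
    push_cast at hqk
    have hq0 : (0 : Int) ≤ (q : Nat) := by positivity
    have hmk : ((pvCPos foods : Nat) : Int) ≤ k := by nlinarith [hqk, hm0, mul_nonneg hq0 hm0]
    have hfuel : (q + 1) * foods.length + f = foods.length + (q * foods.length + f) := by ring
    rw [hfuel]
    have hfull := solLoopA_pass_full foods [] k (q * foods.length + f) h0 hmk
    simp only [List.nil_append, List.length_nil, Nat.cast_zero] at hfull
    rw [hfull]
    have hidx : ((foods.length : Nat) : Int) = (((foods.map pvDec1).length : Nat) : Int) := by simp
    rw [hidx, solLoopA_reset]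
    -- the one-round result
    have hlen1 : (foods.map pvDec1).length = foods.length := by simp
    have hcle := pvCPos_map_dec1_le foods
    have hih := ih (foods.map pvDec1) (k - (pvCPos foods : Int)) f
      (by omega)
      (by
        have h1 : ((pvCPos (foods.map pvDec1) : Nat) : Int) ≤ (pvCPos foods : Nat) := by
          exact_mod_cast hcle
        nlinarith [hqk, h1, hm0, mul_le_mul_of_nonneg_left h1 hq0])
      (by
        intro t' ht' hpos'
        rcases List.mem_map.mp ht' with ⟨t, htmem, rfl⟩
        have := hpos t htmem
        by_cases h : (0 : Int) < t
        · have hq1 := this h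
          simp only [pvDec1, if_pos h] at hpos' ⊢
          push_cast at hq1 ⊢
          omega
        · simp only [pvDec1, if_neg h] at hpos'
          exact absurd hpos' h)
    rw [hlen1] at hih
    rw [hih]
    -- identify the recombined state with the (q+1)-round state
    have emap : (foods.map pvDec1).map (pvDecQ q) = foods.map (pvDecQ (q + 1)) := by
      rw [List.map_map]
      apply List.map_congr_left
      intro t htmem
      simp only [Function.comp_apply, pvDec1, pvDecQ]
      by_cases h : (0 : Int) < t
      · have hq1 := hpos t htmem h
        push_cast at hq1 ⊢
        simp only [if_pos h]
        split_ifs with h1 <;> omega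
      · simp only [if_neg h]
    rw [emap]
    by_cases hq : q = 0
    · subst hq
      simp
    · have hceq : pvCPos (foods.map pvDec1) = pvCPos foods := by
        simp only [pvCPos, List.countP_map]
        apply List.countP_congr
        intro t htmem
        simp only [Function.comp_apply, decide_eq_true_eq, pvDec1]
        by_cases h : (0 : Int) < t
        · have hq1 := hpos t htmem h
          rw [if_pos h]
          constructor <;> intro <;> first | omega | (push_cast at hq1; omega)
        · rw [if_neg h]
      rw [hceq]
      have : k - ((pvCPos foods : Nat) : Int) - (q : Int) * ((pvCPos foods : Nat) : Int)
           = k - ((q : Nat) + 1 : Int) * ((pvCPos foods : Nat) : Int) := by ring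
      rw [this]
      push_cast
      rfl

theorem pvSPos_of_cpos_zero (l : List Int) (h : pvCPos l = 0) : pvSPos l = 0 := by
  induction l with
  | nil => rfl
  | cons t ts ih =>
    simp only [pvCPos, List.countP_cons] at h ih
    by_cases ht : (0 : Int) < t
    · simp [ht] at h
    · simp only [pvSPos, List.map_cons, List.sum_cons] at ih ⊢
      rw [ih (by omega)]
      omega

theorem pvSPos_map_decq (l : List Int) (q : Nat)
    (h : ∀ t ∈ l, 0 < t → (q : Int) ≤ t) :
    pvSPos (l.map (pvDecQ q)) = pvSPos l - (q : Int) * (pvCPos l : Int) := by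
  induction l with
  | nil => simp [pvSPos, pvCPos]
  | cons t ts ih =>
    have hts := ih (fun x hx => h x (List.mem_cons_of_mem _ hx))
    have ht := h t (List.mem_cons_self ..)
    simp only [pvSPos, pvCPos, List.map_cons, List.sum_cons, List.countP_cons] at hts ⊢
    by_cases h0 : (0 : Int) < t
    · have hq := ht h0
      simp only [pvDecQ, if_pos h0]
      rw [hts]
      have h1 : max (t - (q : Int)) 0 = t - q := by omega
      have h2 : max t 0 = t := by omega
      rw [h1, h2]
      simp [h0]
      push_cast
      ring
    · simp only [pvDecQ, if_neg h0]
      rw [hts]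
      simp [h0]
      ring

theorem pvCPos_cast_filter (foods : List Int) :
    ((pvCPos foods : Nat) : Int) = ((foods.filter (fun t => 0 < t)).length : Int) := by
  simp [pvCPos, List.countP_eq_length_filter]

theorem altRounds_bridge (fuelB : Nat) : ∀ (foods : List Int) (k : Int),
    0 ≤ k → k ≤ pvSPos foods → k < (fuelB : Int) →
    0 ≤ (altRounds fuelB foods k).2 ∧
    (altRounds fuelB foods k).2 ≤ pvSPos (altRounds fuelB foods k).1 ∧
    (altRounds fuelB foods k).1.length = foods.length ∧
    (pvCPos (altRounds fuelB foods k).1 = 0 ∨ (altRounds fuelB foods k).2 < (pvCPos (altRounds fuelB foods k).1 : Int)) ∧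
    ∃ C : Nat, C ≤ k.toNat * foods.length ∧ ∀ f : Nat,
      pvFK (solLoopA (C + f) foods k 0) = pvFK (solLoopA f (altRounds fuelB foods k).1 (altRounds fuelB foods k).2 0) := by
  induction fuelB with
  | zero =>
    intro foods k h0 _ hf
    simp at hf
    omega
  | succ fb ih =>
    intro foods k h0 hs hf
    have hcpm := pvCPos_cast_filter foods
    by_cases hexit : ((foods.filter (fun t => 0 < t)).length : Int) = 0 ∨ k < ((foods.filter (fun t => 0 < t)).length : Int)
    · have hred : altRounds (fb+1) foods k = (foods, k) := by
        simp only [altRounds]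
        rw [if_pos hexit]
      rw [hred]
      refine ⟨h0, hs, rfl, ?_, 0, by simp, fun f => by rw [Nat.zero_add]⟩
      show pvCPos foods = 0 ∨ k < (pvCPos foods : Int)
      rcases hexit with h | h
      · left; omega
      · right; omega
    · push_neg at hexit
      obtain ⟨hm0, hkm⟩ := hexit
      have hmnn : (0 : Int) ≤ ((foods.filter (fun t => 0 < t)).length : Int) := by positivity
      have hmpos : (0 : Int) < ((foods.filter (fun t => 0 < t)).length : Int) := by omega
      have hfil : foods.filter (fun t => 0 < t) ≠ [] := by
        intro hemp
        rw [hemp] at hm0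
        simp at hm0
      obtain ⟨sv, hsv⟩ : ∃ sv, PySem.List.min? (foods.filter (fun t => 0 < t)) (fun t => t) = some sv := by
        cases hmin : PySem.List.min? (foods.filter (fun t => 0 < t)) (fun t => t) with
        | none => exact absurd ((PySem.List.min?_eq_none_iff _ _).mp hmin) hfil
        | some sv => exact ⟨sv, rfl⟩
      have hred : altRounds (fb+1) foods k =
          altRounds fb (foods.map (fun t => if 0 < t then t - (min sv (PySem.Int.floordiv k ((foods.filter (fun t => 0 < t)).length : Int))) else t))
            (k - (min sv (PySem.Int.floordiv k ((foods.filter (fun t => 0 < t)).length : Int))) * ((foods.filter (fun t => 0 < t)).length : Int)) := by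
        simp only [altRounds]
        rw [if_neg (by push_neg; exact ⟨hm0, hkm⟩), hsv]
      set m : Int := ((foods.filter (fun t => 0 < t)).length : Int) with hmdef
      set q : Int := min sv (PySem.Int.floordiv k m) with hqdef
      have hsv_mem := PySem.List.min?_mem hsv
      have hsv_pos : 0 < sv := by
        have := (List.mem_filter.mp hsv_mem).2
        simpa using this
      have hsv_min := PySem.List.min?_isMin hsv
      have hfd1 : 1 ≤ PySem.Int.floordiv k m := by
        rw [PySem.Int.le_floordiv_iff_mul_le hmpos]
        omega
      have hq1 : 1 ≤ q := le_min hsv_pos hfd1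
      have hqm : q * m ≤ k := by
        have hq : q ≤ PySem.Int.floordiv k m := min_le_right _ _
        rw [PySem.Int.le_floordiv_iff_mul_le hmpos] at hq
        exact hq
      have hqcast : ((q.toNat : Nat) : Int) = q := Int.toNat_of_nonneg (by omega)
      have hposge : ∀ t ∈ foods, 0 < t → ((q.toNat : Nat) : Int) ≤ t := by
        intro t ht htp
        rw [hqcast]
        calc q ≤ sv := min_le_left _ _
          _ ≤ t := hsv_min t (List.mem_filter.mpr ⟨ht, by simpa using htp⟩)
      have hrounds := solLoopA_rounds q.toNat foods k
      have hfd2 : foods.map (pvDecQ q.toNat) = foods.map (fun t => if 0 < t then t - q else t) := by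
        apply List.map_congr_left
        intro t _
        simp [pvDecQ, hqcast]
      have hspos2 := pvSPos_map_decq foods q.toNat hposge
      rw [hfd2] at hspos2
      rw [hqcast, hcpm] at hspos2
      set foods2 := foods.map (fun t => if 0 < t then t - q else t) with hf2def
      set k2 : Int := k - q * m with hk2def
      have hlen2 : foods2.length = foods.length := by simp [hf2def]
      have hk20 : 0 ≤ k2 := by omega
      have hs2 : k2 ≤ pvSPos foods2 := by rw [hspos2]; omega
      have hqm1 : 1 ≤ q * m := by nlinarith
      have hf2lt : k2 < (fb : Int) := by
        push_cast at hf
        omega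
      obtain ⟨ih0, ih1, ih2, ih3, C2, hC2, hloop2⟩ := ih foods2 k2 hk20 hs2 hf2lt
      rw [hred]
      refine ⟨ih0, ih1, by rw [ih2, hlen2], ih3, q.toNat * foods.length + C2, ?_, ?_⟩
      · rw [hlen2] at hC2
        have hsum : q.toNat + k2.toNat ≤ k.toNat := by
          have h1 : q + k2 ≤ k := by nlinarith
          omega
        calc q.toNat * foods.length + C2 ≤ q.toNat * foods.length + k2.toNat * foods.length :=
              Nat.add_le_add_left hC2 _
          _ = (q.toNat + k2.toNat) * foods.length := by ring
          _ ≤ k.toNat * foods.length := Nat.mul_le_mul_right _ hsum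
      · intro f
        have hstep := hrounds (C2 + f) h0
          (by rw [hqcast, hcpm]; exact hqm) hposge
        rw [hfd2, hqcast, hcpm] at hstep
        rw [Nat.add_assoc, hstep]
        exact hloop2 f

theorem altEat_length (l : List Int) : ∀ k : Int, (altEat l k).1.length = l.length := by
  induction l with
  | nil => intro k; rfl
  | cons t ts ih =>
    intro k
    by_cases hc : 0 < k ∧ 0 < t <;> simp [altEat, hc, ih]

theorem solCheckA_scan (suf : List Int) : ∀ (pre : List Int) (c0 i0 : Int),
    (c0 = -1 ∨ suf ≠ []) →
    (let r := solCheckA (pre ++ suf) (PySem.List.pyRange (pre.length : Int) (((pre ++ suf).length : Nat) : Int) 1) c0 i0;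
     if r.1 = -1 then (-1 : Int) else if r.2 = (((pre ++ suf).length : Nat) : Int) then 1 else r.2 + 1)
    = altScan suf (pre.length : Int) := by
  induction suf with
  | nil =>
    intro pre c0 i0 hc
    have hc0 : c0 = -1 := by tauto
    subst hc0
    have h0 : PySem.List.pyRange (pre.length : Int) (((pre ++ ([]:List Int)).length : Nat) : Int) 1 = [] :=
      PySem.List.pyRange_one_eq_nil (by simp)
    rw [h0]
    rfl
  | cons t ts ih =>
    intro pre c0 i0 _
    have hlt : ((pre.length : Nat) : Int) < (((pre ++ t :: ts).length : Nat) : Int) := by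
      simp <;> omega
    rw [PySem.List.pyRange_one_cons hlt]
    have hstep : solCheckA (pre ++ t :: ts)
          (((pre.length : Nat) : Int) :: PySem.List.pyRange (((pre.length : Nat) : Int) + 1) (((pre ++ t :: ts).length : Nat) : Int) 1) c0 i0
        = if t = 0 then
            solCheckA (pre ++ t :: ts) (PySem.List.pyRange (((pre.length : Nat) : Int) + 1) (((pre ++ t :: ts).length : Nat) : Int) 1) (-1) ((pre.length : Nat) : Int)
          else (0, ((pre.length : Nat) : Int)) := by
      simp only [solCheckA, PySem.List.pyGet?_append_length]
    simp only [hstep]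
    by_cases ht : t = 0
    · rw [if_pos ht]
      subst ht
      have hrec := ih (pre ++ [(0:Int)]) (-1) ((pre.length : Nat) : Int) (Or.inl rfl)
      have e2 : (((pre ++ [(0:Int)]).length : Nat) : Int) = ((pre.length : Nat) : Int) + 1 := by
        push_cast; simp
      rw [e2] at hrec
      simp only [List.append_assoc, List.singleton_append] at hrec
      rw [hrec]
      simp [altScan]
    · rw [if_neg ht]
      have hne2 : ¬ ((pre.length : Nat) : Int) = (((pre ++ t :: ts).length : Nat) : Int) := by omega
      simp only []
      rw [if_neg (by omega : ¬ (0 : Int) = -1), if_neg hne2]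
      simp [altScan, ht]

-- ===== VERDICT (by name: the statement is the Claim_ definition above) =====
theorem solution_spec : Claim_unchanged_solution := by
  unfold Claim_unchanged_solution
  intro food_times k _ hpre
  unfold Spec_solution
  intro hD
  obtain ⟨hk0, hks⟩ := hpre
  have hnil : food_times ≠ [] := hD
  have hn1 : 1 ≤ food_times.length := List.length_pos_iff.mpr hnil
  have hs : k ≤ pvSPos food_times := hks
  have hflt : k < ((k.toNat + 1 : Nat) : Int) := by push_cast; omega
  obtain ⟨h0', h1', hlen', hexit', C, hC, hloop⟩ :=
    altRounds_bridge (k.toNat + 1) food_times k hk0 hs hflt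
  have hexp : k.toNat * (food_times.length + 2) + food_times.length + 2
      = k.toNat * food_times.length + 2 * k.toNat + food_times.length + 2 := by ring
  have hCle : C ≤ k.toNat * (food_times.length + 2) + food_times.length + 2 := by omega
  have hCF : C + (k.toNat * (food_times.length + 2) + food_times.length + 2 - C)
      = k.toNat * (food_times.length + 2) + food_times.length + 2 := by omega
  have hloopF := hloop (k.toNat * (food_times.length + 2) + food_times.length + 2 - C)
  rw [hCF] at hloopF
  have hfinal : pvFK (solLoopA (k.toNat * (food_times.length + 2) + food_times.length + 2 - C)
        (altRounds (k.toNat + 1) food_times k).1 (altRounds (k.toNat + 1) food_times k).2 0)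
      = ((altEat (altRounds (k.toNat + 1) food_times k).1 (altRounds (k.toNat + 1) food_times k).2).1, 0) := by
    rcases hexit' with hm | hkm
    · have hsp0' : pvSPos (altRounds (k.toNat + 1) food_times k).1 = 0 := pvSPos_of_cpos_zero _ hm
      have hk2 : (altRounds (k.toNat + 1) food_times k).2 = 0 := by omega
      rw [hk2, solLoopA_k_zero, altEat_nonpos _ _ le_rfl]
      rfl
    · have hpart := solLoopA_pass_partial (altRounds (k.toNat + 1) food_times k).1 []
        (altRounds (k.toNat + 1) food_times k).2
        (k.toNat * (food_times.length + 2) + food_times.length + 2 - C - food_times.length)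
        h0' hkm
      simp only [List.nil_append, List.length_nil, Nat.cast_zero] at hpart
      have hfuel2 : (altRounds (k.toNat + 1) food_times k).1.length +
          (k.toNat * (food_times.length + 2) + food_times.length + 2 - C - food_times.length)
          = k.toNat * (food_times.length + 2) + food_times.length + 2 - C := by
        rw [hlen']; omega
      rw [hfuel2] at hpart
      exact hpart
  rw [hfinal] at hloopF
  have e1 : (solLoopA (k.toNat * (food_times.length + 2) + food_times.length + 2) food_times k 0).1
      = (altEat (altRounds (k.toNat + 1) food_times k).1 (altRounds (k.toNat + 1) food_times k).2).1 := by
    have := congrArg Prod.fst hloopF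
    simpa [pvFK] using this
  have hsuflen : (altEat (altRounds (k.toNat + 1) food_times k).1 (altRounds (k.toNat + 1) food_times k).2).1.length
      = food_times.length := by
    rw [altEat_length, hlen']
  have hsufne : (altEat (altRounds (k.toNat + 1) food_times k).1 (altRounds (k.toNat + 1) food_times k).2).1 ≠ [] := by
    intro hemp
    rw [hemp] at hsuflen
    simp at hsuflen
    omega
  have hscan := solCheckA_scan
    (altEat (altRounds (k.toNat + 1) food_times k).1 (altRounds (k.toNat + 1) food_times k).2).1 [] 0
    (solLoopA (k.toNat * (food_times.length + 2) + food_times.length + 2) food_times k 0).2.2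
    (Or.inr hsufne)
  simp only [List.nil_append, List.length_nil, Nat.cast_zero] at hscan
  rw [hsuflen] at hscan
  show (let n := PySem.List.len food_times;
    let st := solLoopA (k.toNat * (food_times.length + 2) + food_times.length + 2) food_times k 0;
    let r := solCheckA st.1 (PySem.List.pyRange 0 n 1) 0 st.2.2;
    if r.1 = -1 then (-1:Int) else if r.2 = n then 1 else r.2 + 1)
    = solution_alt food_times k
  simp only [PySem.List.len_eq]
  rw [e1]
  rw [hscan]
  rfl

theorem solution_changed : Claim_changed_solution := by
  unfold Claim_changed_solution; decide

theorem solution_tight : Claim_exact_solution := by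
  unfold Claim_exact_solution
  intro food_times k _ hpre hD
  have h : food_times = [] := hD
  subst h
  obtain ⟨h0, h1⟩ := hpre
  have hk : k = 0 := by
    simp [List.map_nil, List.sum_nil] at h1
    omega
  subst hk
  decide
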